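-- pv_equiv track=rewrite | github.com/Gankydang/random_stuff | prisoner_box_riddle.py | all_prisoners_found_their_number
-- ===== SOURCE A (Python) =====
-- num_of_prisoners = 100
--
-- def all_prisoners_found_their_number(position_of_scrambled_numbers):
--
--     for prisoner in range(1, num_of_prisoners + 1):
--
--         boxes_opened = 0
--         number_in_box = position_of_scrambled_numbers.get(prisoner)
--
--         while (number_in_box != prisoner) and (boxes_opened < (num_of_prisoners / 2) - 1):
--             number_in_box = position_of_scrambled_numbers.get(number_in_box)
--             boxes_opened += 1
--
--         if number_in_box == prisoner:
--             continue
--         else: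
--             return False
--
--     return True
-- ===== SOURCE B (Python) =====
-- num_of_prisoners = 100
--
-- def all_prisoners_found_their_number(position_of_scrambled_numbers):
--     # Cycle decomposition: walk each unvisited prisoner's chain once (at most 50 steps);
--     # on success mark the whole cycle visited so its members are never walked again.
--     visited = set()
--     for prisoner in range(1, num_of_prisoners + 1):
--         if prisoner in visited:
--             continue
--         cycle = []
--         cur = position_of_scrambled_numbers.get(prisoner)
--         steps = num_of_prisoners // 2
--         while True:
--             if steps == 0 or cur is None:
--                 return False
--             if cur == prisoner:
--                 break
--             cycle.append(cur)
--             cur = position_of_scrambled_numbers.get(cur)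
--             steps -= 1
--         visited.add(prisoner)
--         visited.update(cycle)
--     return True
-- ===== Notes on version B (the rewrite author's own statement) =====
-- stated objective: alternative
-- what changed: A walks up to 50 chain steps independently for each of the 100 prisoners; B does one cycle decomposition with a visited set, walking each cycle only once and skipping prisoners already known to lie on a short enough cycle.
import Mathlib
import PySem

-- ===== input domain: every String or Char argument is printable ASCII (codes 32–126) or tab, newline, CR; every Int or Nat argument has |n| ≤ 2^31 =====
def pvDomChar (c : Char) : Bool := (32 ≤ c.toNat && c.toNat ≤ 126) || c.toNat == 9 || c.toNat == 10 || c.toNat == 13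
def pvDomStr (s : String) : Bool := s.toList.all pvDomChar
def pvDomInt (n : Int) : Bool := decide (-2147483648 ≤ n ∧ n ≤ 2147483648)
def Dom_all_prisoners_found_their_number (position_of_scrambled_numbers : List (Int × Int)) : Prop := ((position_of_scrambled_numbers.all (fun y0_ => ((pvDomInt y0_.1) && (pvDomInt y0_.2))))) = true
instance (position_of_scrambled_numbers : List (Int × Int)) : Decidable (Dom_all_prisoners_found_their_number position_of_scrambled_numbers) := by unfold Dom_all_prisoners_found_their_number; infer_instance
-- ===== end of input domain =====

-- B replaces A's independent bounded walk per prisoner by one cycle decomposition with a visited set,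
-- so each cycle is walked only once (objective: alternative algorithm; return value identical).

-- shared accessor: Python's dict.get(k) on the association list
def pvGet (d : List (Int × Int)) (k : Int) : Option Int := (PySem.Dict.mk d).get? k

-- dict.get applied to a possibly-None key (None is never a key, so .get(None) = None)
def pvGetO (d : List (Int × Int)) : Option Int → Option Int
  | none => none
  | some v => pvGet d v

-- ===== PORT A =====
-- A's inner while-loop; fuel = 49 - boxes_opened (loop runs while boxes_opened < 100/2 - 1 = 49)
def aLoop (d : List (Int × Int)) (p : Int) : Option Int → Nat → Option Int
  | nb, 0 => nb
  | nb, Nat.succ fuel => if nb == some p then nb else aLoop d p (pvGetO d nb) fuel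

-- A's outer for-loop over the prisoners
def aOuter (d : List (Int × Int)) : List Int → Bool
  | [] => true
  | p :: rest =>
      let nb := aLoop d p (pvGet d p) 49
      if nb == some p then aOuter d rest else false

def all_prisoners_found_their_number (position_of_scrambled_numbers : List (Int × Int)) : Bool :=
  aOuter position_of_scrambled_numbers (PySem.List.pyRange 1 101 1)

-- ===== PORT B =====
-- B's while-loop: walk from `cur`, collecting the cycle; some cycle = came back to p, none = failure
def bWalk (d : List (Int × Int)) (p : Int) : Option Int → List Int → Nat → Option (List Int)
  | _, _, 0 => none
  | none, _, Nat.succ _ => none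
  | some v, cyc, Nat.succ steps =>
      if v == p then some cyc
      else bWalk d p (pvGet d v) (cyc ++ [v]) steps

-- B's for-loop with the visited set
def bGo (d : List (Int × Int)) (visited : PySem.Set Int) : List Int → Bool
  | [] => true
  | p :: rest =>
      if PySem.Set.contains visited p then bGo d visited rest
      else
        match bWalk d p (pvGet d p) [] 50 with
        | none => false
        | some cyc => bGo d (PySem.Set.update (PySem.Set.add visited p) cyc) rest

def all_prisoners_found_their_number_alt (position_of_scrambled_numbers : List (Int × Int)) : Bool :=
  bGo position_of_scrambled_numbers PySem.Set.empty (PySem.List.pyRange 1 101 1)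

-- ===== PRECONDITION & SPEC =====
def Spec_all_prisoners_found_their_number (position_of_scrambled_numbers : List (Int × Int)) (out : Bool) : Prop := out = all_prisoners_found_their_number_alt position_of_scrambled_numbers
instance (position_of_scrambled_numbers : List (Int × Int)) (out : Bool) : Decidable (Spec_all_prisoners_found_their_number position_of_scrambled_numbers out) := by unfold Spec_all_prisoners_found_their_number; infer_instance

-- ===== CLAIM (what is proved, stated in full; the proofs are below) =====
def Claim_equal_all_prisoners_found_their_number : Prop := ∀ (position_of_scrambled_numbers : List (Int × Int)), Dom_all_prisoners_found_their_number position_of_scrambled_numbers → Spec_all_prisoners_found_their_number position_of_scrambled_numbers (all_prisoners_found_their_number position_of_scrambled_numbers)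

-- ===== LEMMAS AND PROOFS =====

-- j-fold application of dict.get, starting from an optional value
def iterG (d : List (Int × Int)) : Nat → Option Int → Option Int
  | 0, c => c
  | Nat.succ n, c => iterG d n (pvGetO d c)

-- "prisoner p succeeds": the chain from box p returns to p within 50 openings
def Ok (d : List (Int × Int)) (p : Int) : Prop := ∃ j < 50, iterG d j (pvGet d p) = some p

-- B's walk as a Boolean success test
def okB (d : List (Int × Int)) (p : Int) : Bool := (bWalk d p (pvGet d p) [] 50).isSome

lemma iterG_none (d : List (Int × Int)) (n : Nat) : iterG d n none = none := by
  induction n with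
  | zero => rfl
  | succ n ih => simpa [iterG, pvGetO] using ih

lemma iterG_succ' (d : List (Int × Int)) (n : Nat) (c : Option Int) :
    iterG d (n + 1) c = pvGetO d (iterG d n c) := by
  induction n generalizing c with
  | zero => rfl
  | succ n ih => simpa [iterG] using ih (pvGetO d c)

lemma iterG_add (d : List (Int × Int)) (a b : Nat) (c : Option Int) :
    iterG d (a + b) c = iterG d a (iterG d b c) := by
  induction a with
  | zero => simp [iterG]
  | succ a ih => rw [Nat.succ_add, iterG_succ', iterG_succ', ih]

lemma aLoop_iff (d : List (Int × Int)) (p : Int) (n : Nat) (c : Option Int) :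
    aLoop d p c n = some p ↔ ∃ j ≤ n, iterG d j c = some p := by
  induction n generalizing c with
  | zero =>
      constructor
      · intro h; exact ⟨0, Nat.le_refl _, h⟩
      · rintro ⟨j, hj, h⟩; interval_cases j; exact h
  | succ n ih =>
      by_cases hc : c = some p
      · constructor
        · intro _; exact ⟨0, Nat.zero_le _, hc⟩
        · intro _; simp [aLoop, hc]
      · have hbe : (c == some p) = false := by simp [hc]
        simp only [aLoop, hbe, Bool.false_eq_true, if_false]
        rw [ih]
        constructor
        · rintro ⟨j, hj, h⟩
          exact ⟨j + 1, by omega, by simpa [iterG] using h⟩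
        · rintro ⟨j, hj, h⟩
          cases j with
          | zero => exact absurd h hc
          | succ j => exact ⟨j, by omega, by simpa [iterG] using h⟩

lemma bWalk_isSome_iff (d : List (Int × Int)) (p : Int) (n : Nat) (c : Option Int) (acc : List Int) :
    (bWalk d p c acc n).isSome = true ↔ ∃ j < n, iterG d j c = some p := by
  induction n generalizing c acc with
  | zero => simp [bWalk]
  | succ n ih =>
      cases c with
      | none =>
          simp only [bWalk, Option.isSome_none, Bool.false_eq_true, false_iff]
          rintro ⟨j, _, h⟩
          rw [iterG_none] at h
          simp at h
      | some v =>
          by_cases hv : v = p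
          · subst hv
            simp only [bWalk, BEq.rfl, if_true, Option.isSome_some, true_iff]
            exact ⟨0, by omega, rfl⟩
          · have hbe : (v == p) = false := by simp [hv]
            simp only [bWalk, hbe, Bool.false_eq_true, if_false]
            rw [ih]
            constructor
            · rintro ⟨j, hj, h⟩
              exact ⟨j + 1, by omega, by simpa [iterG, pvGetO] using h⟩
            · rintro ⟨j, hj, h⟩
              cases j with
              | zero =>
                  simp only [iterG, Option.some.injEq] at h
                  exact absurd h hv
              | succ j => exact ⟨j, by omega, by simpa [iterG, pvGetO] using h⟩

lemma bWalk_mem (d : List (Int × Int)) (p : Int) (n : Nat) (c : Option Int) (acc out : List Int)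
    (h : bWalk d p c acc n = some out) (q : Int) (hq : q ∈ out) :
    q ∈ acc ∨ ∃ i, iterG d i c = some q := by
  induction n generalizing c acc with
  | zero => simp [bWalk] at h
  | succ n ih =>
      cases c with
      | none => simp [bWalk] at h
      | some v =>
          by_cases hv : v = p
          · subst hv
            simp only [bWalk, BEq.rfl, if_true, Option.some.injEq] at h
            subst h; exact Or.inl hq
          · have hbe : (v == p) = false := by simp [hv]
            simp only [bWalk, hbe, Bool.false_eq_true, if_false] at h
            rcases ih _ _ h with hin | ⟨i, hi⟩
            · rcases List.mem_append.mp hin with hin | hin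
              · exact Or.inl hin
              · right
                refine ⟨0, ?_⟩
                simp only [List.mem_singleton] at hin
                simp [iterG, hin]
            · exact Or.inr ⟨i + 1, by simpa [iterG, pvGetO] using hi⟩

lemma okB_iff (d : List (Int × Int)) (p : Int) : okB d p = true ↔ Ok d p := by
  unfold okB Ok
  exact bWalk_isSome_iff d p 50 (pvGet d p) []

-- every member of a successful cycle succeeds itself (commuting iterates)
lemma ok_of_cycle (d : List (Int × Int)) (p q : Int)
    (hk : Ok d p)
    (hi : ∃ i, iterG d i (pvGet d p) = some q) : Ok d q := by
  rcases hk with ⟨k, hk50, hk⟩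
  rcases hi with ⟨i, hi⟩
  have hp1 : iterG d (k + 1) (some p) = some p := hk
  have hq1 : iterG d (i + 1) (some p) = some q := hi
  refine ⟨k, hk50, ?_⟩
  have e1 : iterG d k (pvGet d q) = iterG d (k + 1) (some q) := rfl
  rw [e1, ← hq1, ← iterG_add, Nat.add_comm, iterG_add, hp1, hq1]

lemma aOuter_eq (d : List (Int × Int)) (l : List Int) :
    aOuter d l = l.all (okB d) := by
  induction l with
  | nil => rfl
  | cons p rest ih =>
      have hiff : aLoop d p (pvGet d p) 49 = some p ↔ okB d p = true := by
        rw [aLoop_iff, okB_iff]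
        unfold Ok
        constructor
        · rintro ⟨j, hj, h⟩; exact ⟨j, by omega, h⟩
        · rintro ⟨j, hj, h⟩; exact ⟨j, by omega, h⟩
      by_cases h : okB d p = true
      · have hb : (aLoop d p (pvGet d p) 49 == some p) = true :=
          beq_iff_eq.mpr (hiff.mpr h)
        simp [aOuter, hb, ih, List.all_cons, h]
      · have hb : (aLoop d p (pvGet d p) 49 == some p) = false := by
          apply beq_eq_false_iff_ne.mpr
          intro hc
          exact h (hiff.mp hc)
        simp [aOuter, hb, List.all_cons, Bool.eq_false_iff.mpr h]

lemma bGo_eq (d : List (Int × Int)) (l : List Int) (visited : PySem.Set Int)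
    (hv : ∀ q ∈ visited, Ok d q) :
    bGo d visited l = l.all (okB d) := by
  induction l generalizing visited with
  | nil => rfl
  | cons p rest ih =>
      by_cases hmem : p ∈ visited
      · have hok : okB d p = true := (okB_iff d p).mpr (hv p hmem)
        simp [bGo, hmem, ih visited hv, List.all_cons, hok]
      · have hc : PySem.Set.contains visited p = false := by
          apply Bool.eq_false_iff.mpr
          intro h
          exact hmem ((PySem.Set.contains_iff visited p).mp h)
        simp only [bGo, hc, Bool.false_eq_true, if_false]
        rcases hw : bWalk d p (pvGet d p) [] 50 with _ | cyc
        · have hnok : okB d p = false := by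
            unfold okB; rw [hw]; rfl
          simp [List.all_cons, hnok]
        · have hsome : okB d p = true := by
            unfold okB; rw [hw]; rfl
          have hok : Ok d p := (okB_iff d p).mp hsome
          have hv' : ∀ q ∈ PySem.Set.update (PySem.Set.add visited p) cyc, Ok d q := by
            intro q hq
            rcases (PySem.Set.mem_update (PySem.Set.add visited p) cyc q).mp hq with hq | hq
            · rcases (PySem.Set.mem_add visited p q).mp hq with hq | hq
              · exact hv q hq
              · subst hq; exact hok
            · rcases bWalk_mem d p 50 (pvGet d p) [] cyc hw q hq with hin | hi
              · simp at hin
              · exact ok_of_cycle d p q hok hi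
          simp [List.all_cons, hsome, ih _ hv']

-- ===== VERDICT (by name: the statement is the Claim_ definition above) =====
theorem all_prisoners_found_their_number_spec : Claim_equal_all_prisoners_found_their_number := by
  intro d _
  unfold Spec_all_prisoners_found_their_number all_prisoners_found_their_number all_prisoners_found_their_number_alt
  rw [aOuter_eq, bGo_eq]
  intro q hq
  simp [PySem.Set.empty] at hq
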